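-- pv_equiv track=rewrite | github.com/ChristopherSClosser/code-katas | string_pyramid.py | watch_pyramid_from_above
-- ===== SOURCE A (Python) =====
-- def watch_pyramid_from_above(characters):
--     """Show the pyramid as you would see from above."""
--     if not characters:
--         return characters
--     _len = len(characters)*2-1
--     res = '\n'.join(characters[0:min(i, _len-1-i)] +
--                     characters[min(i, _len-1-i)]*(_len-2*min(i, _len-1-i)) +
--                     characters[0:min(i, _len-1-i)][::-1] for i in range(_len))
--     return res
-- ===== SOURCE B (Python) =====
-- def watch_pyramid_from_above(characters):
--     """Show the pyramid as you would see from above."""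
--     if not characters:
--         return characters
--     n = len(characters)
--     w = 2 * n - 1
--     upper = []
--     for m in range(n):
--         left = characters[:m]
--         upper.append(left + characters[m] * (w - 2 * m) + left[::-1])
--     return '\n'.join(upper + upper[:-1][::-1])
-- ===== Notes on version B (the rewrite author's own statement) =====
-- stated objective: alternative
-- what changed: A computes every one of the 2n-1 rows independently, re-deriving the mirror index min(i, len-1-i) per row inside one join over range(2n-1); B builds only the n rows of the upper half with an append loop and produces the lower half by mirroring that list (upper + upper[:-1][::-1]), exploiting the pyramid's vertical symmetry.
import Mathlib
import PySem

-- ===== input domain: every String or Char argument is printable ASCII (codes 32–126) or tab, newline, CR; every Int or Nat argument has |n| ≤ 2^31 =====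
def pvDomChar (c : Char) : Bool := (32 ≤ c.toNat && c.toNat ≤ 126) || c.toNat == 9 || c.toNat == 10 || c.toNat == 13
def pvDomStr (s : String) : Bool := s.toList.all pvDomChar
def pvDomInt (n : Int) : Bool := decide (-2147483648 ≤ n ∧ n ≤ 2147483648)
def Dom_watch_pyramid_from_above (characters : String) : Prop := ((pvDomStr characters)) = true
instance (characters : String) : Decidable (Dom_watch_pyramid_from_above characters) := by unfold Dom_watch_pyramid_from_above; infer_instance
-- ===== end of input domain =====

-- B builds only the upper half of the pyramid and mirrors it (upper + upper[:-1][::-1]);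
-- A generates all 2n-1 rows independently. Same return value on every input (alternative decomposition, not faster).

-- ===== PORT A =====
-- one generated row of A's join: characters[0:m] + characters[m]*(L-2m) + characters[0:m][::-1], m = min(i, L-1-i)
-- characters[m] is always in range when the string is nonempty, so Python never raises; '.getD' only totalizes pyGet?
def pvRowA (cs : List Char) (L i : Int) : List Char :=
  let m := min i (L - 1 - i)
  PySem.List.slice cs (some 0) (some m) ++
  PySem.List.pyRepeat [(PySem.List.pyGet? cs m).getD ' '] (L - 2 * m) ++
  ((PySem.List.slice? (PySem.List.slice cs (some 0) (some m)) none none (-1)).getD [])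

def watch_pyramid_from_above (characters : String) : String :=
  if characters.toList.isEmpty then characters
  else
    let cs := characters.toList
    let L : Int := (cs.length : Int) * 2 - 1
    String.ofList (PySem.Chars.join ['\n'] ((PySem.List.pyRange 0 L).map (pvRowA cs L)))

-- ===== PORT B =====
-- one row of the upper half: left + characters[m]*(w-2m) + left[::-1], left = characters[:m]
def pvRowB (cs : List Char) (w m : Int) : List Char :=
  let left := PySem.List.slice cs none (some m)
  left ++ PySem.List.pyRepeat [(PySem.List.pyGet? cs m).getD ' '] (w - 2 * m) ++
  ((PySem.List.slice? left none none (-1)).getD [])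

def watch_pyramid_from_above_alt (characters : String) : String :=
  if characters.toList.isEmpty then characters
  else
    let cs := characters.toList
    let n := cs.length
    let w : Int := 2 * (n : Int) - 1
    let upper := (PySem.List.pyRange 0 (n : Int)).foldl (fun acc m => acc ++ [pvRowB cs w m]) []
    String.ofList (PySem.Chars.join ['\n']
      (upper ++ ((PySem.List.slice? (PySem.List.slice upper none (some (-1))) none none (-1)).getD [])))

-- ===== PRECONDITION & SPEC =====
def Spec_watch_pyramid_from_above (characters : String) (out : String) : Prop := out = watch_pyramid_from_above_alt characters
instance (characters : String) (out : String) : Decidable (Spec_watch_pyramid_from_above characters out) := by unfold Spec_watch_pyramid_from_above; infer_instance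

-- ===== CLAIM (what is proved, stated in full; the proofs are below) =====
def Claim_equal_watch_pyramid_from_above : Prop := ∀ (characters : String), Dom_watch_pyramid_from_above characters → Spec_watch_pyramid_from_above characters (watch_pyramid_from_above characters)

-- ===== LEMMAS AND PROOFS =====

-- A's row is B's row at the mirrored index m = min(i, L-1-i)
lemma pvRowA_eq (cs : List Char) (L i : Int) :
    pvRowA cs L i = pvRowB cs L (min i (L - 1 - i)) := by
  simp [pvRowA, pvRowB, PySem.List.slice_zero_start]

-- the mirror-index traversal of range(2n-1) is the upper half followed by its reflection
lemma pvHalfMirror {α : Type} (g : Int → α) (n : Nat) (hn : 1 ≤ n) :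
    (List.range (2 * n - 1)).map
        (fun (k : Nat) => g (min (k : Int) (((2 * n - 1 : Nat) : Int) - 1 - (k : Int)))) =
    (List.range n).map (fun (k : Nat) => g (k : Int)) ++
      (((List.range n).map (fun (k : Nat) => g (k : Int))).dropLast).reverse := by
  apply List.ext_getElem
  · simp only [List.length_map, List.length_append, List.length_reverse, List.length_dropLast,
      List.length_range]
    omega
  · intro k h1 h2
    simp only [List.length_map, List.length_range] at h1
    simp only [List.getElem_map, List.getElem_range]
    by_cases hk : k < n
    · rw [List.getElem_append_left (by simp only [List.length_map, List.length_range]; omega)]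
      simp only [List.getElem_map, List.getElem_range]
      congr 1
      omega
    · rw [List.getElem_append_right (by simp only [List.length_map, List.length_range]; omega)]
      rw [List.getElem_reverse, List.getElem_dropLast]
      simp only [List.getElem_map, List.getElem_range, List.length_map, List.length_range,
        List.length_dropLast]
      congr 1
      omega

-- ===== VERDICT (by name: the statement is the Claim_ definition above) =====
theorem watch_pyramid_from_above_spec : Claim_equal_watch_pyramid_from_above := by
  intro characters _
  unfold Spec_watch_pyramid_from_above watch_pyramid_from_above watch_pyramid_from_above_alt
  by_cases h : characters.toList.isEmpty
  · simp [h]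
  · simp only [h, Bool.false_eq_true, if_false]
    set cs := characters.toList with hcs
    have hcsne : cs ≠ [] := by simpa [List.isEmpty_iff] using h
    have hn : 1 ≤ cs.length := List.length_pos_of_ne_nil hcsne
    set n := cs.length with hnn
    have hL1 : (n : Int) * 2 - 1 = ((2 * n - 1 : Nat) : Int) := by
      push_cast [Nat.cast_sub (by omega : 1 ≤ 2 * n)]; ring
    have hL2 : 2 * (n : Int) - 1 = ((2 * n - 1 : Nat) : Int) := by
      push_cast [Nat.cast_sub (by omega : 1 ≤ 2 * n)]; ring
    rw [hL1, hL2]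
    rw [PySem.List.pyRange_zero_natCast, PySem.List.pyRange_zero_natCast,
      PySem.List.foldl_append_singleton_eq_map, List.nil_append,
      PySem.List.slice_to_neg_one, PySem.List.slice?_none_none_neg_one]
    simp only [List.map_map, Option.getD_some, Function.comp_def]
    congr 1
    congr 1
    rw [List.map_congr_left (fun (k : Nat) _ => pvRowA_eq cs ((2 * n - 1 : Nat) : Int) (k : Int))]
    exact pvHalfMirror (pvRowB cs ((2 * n - 1 : Nat) : Int)) n hn
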